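-- pv_equiv track=rewrite | github.com/LeopoldACC/Algorithm | dp/区间型/5471.和为目标值的最大数目不重复子数组.py | maxNonOverlapping
-- ===== SOURCE A (Python) =====
-- def maxNonOverlapping(nums, target: int) -> int:
--     res = 0
--     sums = 0
--     visit = set()
--     visit.add(0)#对于第一次sums==target的特判 1 1 1 1 1
--     for num in nums:
--         sums+=num
--         if sums-target in visit:
--             visit = set()
--             res+=1
--             sums=0
--         visit.add(sums)
--     return res
-- ===== SOURCE B (Python) =====
-- def maxNonOverlapping(nums, target: int) -> int:
--     best = 0
--     prefix = 0
--     seen = {0: 0}  # prefix sum -> best count achievable at its last occurrence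
--     for num in nums:
--         prefix += num
--         if prefix - target in seen:
--             c = seen[prefix - target] + 1
--             if c > best:
--                 best = c
--         seen[prefix] = best
--     return best
-- ===== Notes on version B (the rewrite author's own statement) =====
-- stated objective: alternative
-- what changed: A is an eager greedy that resets its prefix-sum set and counter whenever a subarray hitting target ends; B is a never-resetting prefix-sum dynamic program over a dict seen={prefixSum: best count at its last occurrence}, taking best = max(best, seen[prefix-target]+1) at each step.
import Mathlib
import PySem

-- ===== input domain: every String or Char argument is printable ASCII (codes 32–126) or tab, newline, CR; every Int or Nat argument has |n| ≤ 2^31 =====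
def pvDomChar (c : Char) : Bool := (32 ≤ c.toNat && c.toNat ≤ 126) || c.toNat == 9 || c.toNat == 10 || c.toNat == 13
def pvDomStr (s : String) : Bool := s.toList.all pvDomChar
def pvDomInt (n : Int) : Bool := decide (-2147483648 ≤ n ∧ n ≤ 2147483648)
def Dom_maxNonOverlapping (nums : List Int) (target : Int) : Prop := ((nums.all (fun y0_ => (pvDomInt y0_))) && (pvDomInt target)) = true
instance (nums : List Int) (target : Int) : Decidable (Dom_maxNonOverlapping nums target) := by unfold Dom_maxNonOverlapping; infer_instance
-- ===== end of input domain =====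

-- B replaces A's reset-and-increment greedy with a never-resetting pfx-sum DP over a
-- dict of best counts (alternative decomposition, same asymptotic cost).

-- ===== PORT A =====
-- state: (res, sums, visit)
def pvStepA (target : Int) (st : Int × Int × PySem.Set Int) (num : Int) :
    Int × Int × PySem.Set Int :=
  let sums := st.2.1 + num
  if PySem.Set.contains st.2.2 (sums - target) then
    -- visit = set(); res += 1; sums = 0; visit.add(sums)
    (st.1 + 1, 0, PySem.Set.add PySem.Set.empty 0)
  else
    (st.1, sums, PySem.Set.add st.2.2 sums)

def maxNonOverlapping (nums : List Int) (target : Int) : Int :=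
  (nums.foldl (pvStepA target) (0, 0, PySem.Set.add PySem.Set.empty 0)).1

-- ===== PORT B =====
-- state: (best, pfx, seen)
def pvStepB (target : Int) (st : Int × Int × PySem.Dict Int Int) (num : Int) :
    Int × Int × PySem.Dict Int Int :=
  let pfx := st.2.1 + num
  let best :=
    if (st.2.2).contains (pfx - target) then
      let c := (st.2.2).getD (pfx - target) 0 + 1
      if st.1 < c then c else st.1
    else st.1
  (best, pfx, (st.2.2).insert pfx best)

def maxNonOverlapping_alt (nums : List Int) (target : Int) : Int :=
  (nums.foldl (pvStepB target) (0, 0, PySem.Dict.empty.insert 0 0)).1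

-- ===== PRECONDITION & SPEC =====
def Spec_maxNonOverlapping (nums : List Int) (target : Int) (out : Int) : Prop := out = maxNonOverlapping_alt nums target
instance (nums : List Int) (target : Int) (out : Int) : Decidable (Spec_maxNonOverlapping nums target out) := by unfold Spec_maxNonOverlapping; infer_instance

-- ===== CLAIM (what is proved, stated in full; the proofs are below) =====
def Claim_equal_maxNonOverlapping : Prop := ∀ (nums : List Int) (target : Int), Dom_maxNonOverlapping nums target → Spec_maxNonOverlapping nums target (maxNonOverlapping nums target)

-- ===== LEMMAS AND PROOFS =====

-- The simulation invariant tying A's since-last-reset state to B's global DP state: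
-- best = res; every relative pfx s in visit appears in seen at absolute key
-- (pfx - sums + s) with stored count res; and every other key of seen stores ≤ res - 1.
def pvInv (a : Int × Int × PySem.Set Int) (b : Int × Int × PySem.Dict Int Int) : Prop :=
  b.1 = a.1 ∧
  (∀ s ∈ a.2.2, (b.2.2).contains (b.2.1 - a.2.1 + s) = true ∧
      (b.2.2).getD (b.2.1 - a.2.1 + s) 0 = a.1) ∧
  (∀ p : Int, (b.2.2).contains p = true →
      (p - (b.2.1 - a.2.1)) ∈ a.2.2 ∨ (b.2.2).getD p 0 ≤ a.1 - 1)

theorem pvInv_step (target x : Int) (a : Int × Int × PySem.Set Int)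
    (b : Int × Int × PySem.Dict Int Int) (h : pvInv a b) :
    pvInv (pvStepA target a x) (pvStepB target b x) := by
  obtain ⟨res, sums, visit⟩ := a
  obtain ⟨best, pfx, seen⟩ := b
  obtain ⟨hbest, h1, h2⟩ := h
  simp only at hbest h1 h2
  have hkey : pfx - sums + (sums + x - target) = pfx + x - target := by ring
  by_cases hc : (sums + x - target) ∈ visit
  · -- A hits: reset.  B's lookup finds value res, so best becomes res + 1.
    obtain ⟨hcont, hval⟩ := h1 _ hc
    rw [hkey] at hcont hval
    have hlt : res < res + 1 := by omega
    simp only [pvStepA, pvStepB, (PySem.Set.contains_iff visit (sums + x - target)).2 hc,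
      hcont, hval, hbest, if_pos hlt, if_true, if_pos rfl]
    refine ⟨rfl, ?_, ?_⟩
    · intro s hs
      have hs0 : s = 0 := by
        simpa [PySem.Set.mem_add, PySem.Set.empty] using hs
      subst hs0
      constructor
      · simpa using PySem.Dict.contains_insert_self seen (pfx + x) (res + 1)
      · simpa using PySem.Dict.getD_insert_self seen (pfx + x) (res + 1) 0
    · intro p hp
      rw [PySem.Dict.contains_insert] at hp
      by_cases hpe : p = pfx + x
      · left
        subst hpe
        simp [PySem.Set.mem_add, PySem.Set.empty]
      · right
        have hpold : seen.contains p = true := by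
          rcases Bool.or_eq_true_iff.1 hp with h' | h'
          · exact absurd (by exact_mod_cast of_decide_eq_true (by simpa using h')) hpe
          · exact h'
        rw [PySem.Dict.getD_insert_of_ne seen (res + 1) 0 hpe]
        rcases h2 p hpold with hmem | hle
        · -- key since last reset: its stored value is res
          have := (h1 _ hmem).2
          have hk : pfx - sums + (p - (pfx - sums)) = p := by ring
          rw [hk] at this
          omega
        · omega
  · -- A misses: B's candidate (if any) is stale, so best stays res.
    have hcA : PySem.Set.contains visit (sums + x - target) = false := by
      by_contra hne
      exact hc ((PySem.Set.contains_iff visit (sums + x - target)).1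
        (by revert hne; cases PySem.Set.contains visit (sums + x - target) <;> simp))
    have hbeq : (if seen.contains (pfx + x - target) = true then
        (let c := seen.getD (pfx + x - target) 0 + 1; if best < c then c else best)
        else best) = res := by
      by_cases hsc : seen.contains (pfx + x - target) = true
      · rcases h2 _ hsc with hmem | hle
        · exfalso
          have : pfx + x - target - (pfx - sums) = sums + x - target := by ring
          rw [this] at hmem
          exact hc hmem
        · simp only [if_pos hsc, hbest]
          rw [if_neg (by omega)]
      · simp [hsc, hbest]
    simp only [pvStepA, pvStepB, hcA, hbeq]
    simp only [Bool.false_eq_true, if_false]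
    refine ⟨rfl, ?_, ?_⟩
    · intro s hs
      rcases (PySem.Set.mem_add visit (sums + x) s).1 hs with hs' | hs'
      · have hoff : pfx + x - (sums + x) + s = pfx - sums + s := by ring
        rw [hoff]
        obtain ⟨hcont, hval⟩ := h1 _ hs'
        constructor
        · rw [PySem.Dict.contains_insert]
          simp [hcont]
        · by_cases hke : pfx - sums + s = pfx + x
          · rw [hke]
            simpa using PySem.Dict.getD_insert_self seen (pfx + x) res 0
          · rw [PySem.Dict.getD_insert_of_ne seen res 0 hke]
            exact hval
      · subst hs'
        have hoff : pfx + x - (sums + x) + (sums + x) = pfx + x := by ring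
        rw [hoff]
        constructor
        · simpa using PySem.Dict.contains_insert_self seen (pfx + x) res
        · simpa using PySem.Dict.getD_insert_self seen (pfx + x) res 0
    · intro p hp
      by_cases hpe : p = pfx + x
      · left
        subst hpe
        have : pfx + x - (pfx + x - (sums + x)) = sums + x := by ring
        rw [this]
        exact (PySem.Set.mem_add visit (sums + x) (sums + x)).2 (Or.inr rfl)
      · rw [PySem.Dict.contains_insert] at hp
        have hpold : seen.contains p = true := by
          rcases Bool.or_eq_true_iff.1 hp with h' | h'
          · exact absurd (by exact_mod_cast of_decide_eq_true (by simpa using h')) hpe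
          · exact h'
        rcases h2 p hpold with hmem | hle
        · left
          have : p - (pfx + x - (sums + x)) = p - (pfx - sums) := by ring
          rw [this]
          exact (PySem.Set.mem_add visit (sums + x) _).2 (Or.inl hmem)
        · right
          rw [PySem.Dict.getD_insert_of_ne seen res 0 hpe]
          exact hle

theorem pvInv_foldl (target : Int) (l : List Int) (a : Int × Int × PySem.Set Int)
    (b : Int × Int × PySem.Dict Int Int) (h : pvInv a b) :
    (l.foldl (pvStepA target) a).1 = (l.foldl (pvStepB target) b).1 := by
  induction l generalizing a b with
  | nil => exact h.1.symm
  | cons x xs ih => exact ih _ _ (pvInv_step target x a b h)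

theorem pvInv_init : pvInv (0, 0, PySem.Set.add PySem.Set.empty 0)
    ((0 : Int), (0 : Int), PySem.Dict.empty.insert 0 0) := by
  refine ⟨rfl, ?_, ?_⟩
  · intro s hs
    have hs0 : s = 0 := by simpa [PySem.Set.mem_add, PySem.Set.empty] using hs
    subst hs0
    constructor
    · simpa using PySem.Dict.contains_insert_self (PySem.Dict.empty (κ := Int) (ν := Int)) 0 0
    · simpa using PySem.Dict.getD_insert_self (PySem.Dict.empty (κ := Int) (ν := Int)) 0 0 0
  · intro p hp
    simp only [PySem.Dict.contains_insert] at hp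
    left
    have hp0 : p = 0 := by
      rcases Bool.or_eq_true_iff.1 hp with h' | h'
      · exact_mod_cast of_decide_eq_true (by simpa using h')
      · simp [PySem.Dict.contains_empty] at h'
    subst hp0
    simp [PySem.Set.mem_add, PySem.Set.empty]

-- ===== VERDICT (by name: the statement is the Claim_ definition above) =====
theorem maxNonOverlapping_spec : Claim_equal_maxNonOverlapping := by
  intro nums target _
  unfold Spec_maxNonOverlapping maxNonOverlapping maxNonOverlapping_alt
  exact pvInv_foldl target nums _ _ pvInv_init
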